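-- pv_equiv track=rewrite | github.com/rejoyc-cs/k_mer_in_DNA | k_mer in DNA.py | count_imers
-- ===== SOURCE A (Python) =====
-- def count_imers(seq, i):
--     counts = {}
--     num_imers = len(seq) - i + 1
--     for k in range(num_imers):
--         imer = seq[k:k+i]
--         if imer not in counts:
--             counts[imer] = 0
--         counts[imer] += 1
--     return counts
-- ===== SOURCE B (Python) =====
-- def count_imers(seq, i):
--     windows = [seq[k:k+i] for k in range(len(seq) - i + 1)]
--     return {w: windows.count(w) for w in dict.fromkeys(windows)}
-- ===== Notes on version B (the rewrite author's own statement) =====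
-- stated objective: alternative
-- what changed: B materialises the list of all windows once, deduplicates it in first-occurrence order, and builds each count with list.count per distinct window, instead of A's running dict-of-counters loop.
import Mathlib
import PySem

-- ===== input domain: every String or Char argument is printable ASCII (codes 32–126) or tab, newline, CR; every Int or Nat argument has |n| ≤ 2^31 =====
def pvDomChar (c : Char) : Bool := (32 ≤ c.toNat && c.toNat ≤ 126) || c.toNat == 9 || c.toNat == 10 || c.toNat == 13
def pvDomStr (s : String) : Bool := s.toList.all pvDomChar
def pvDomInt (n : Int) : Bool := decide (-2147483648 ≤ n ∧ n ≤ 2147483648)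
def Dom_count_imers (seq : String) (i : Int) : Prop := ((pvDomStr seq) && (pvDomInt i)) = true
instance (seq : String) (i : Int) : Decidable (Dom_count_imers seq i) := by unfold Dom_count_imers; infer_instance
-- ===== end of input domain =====

-- B replaces A's running dict-of-counters loop by: build the window list once, dedup it in
-- first-occurrence order, and count each distinct window with list.count (objective: alternative).

-- ===== PORT A =====
def count_imers (seq : String) (i : Int) : List (String × Int) :=
  let num_imers : Int := PySem.Str.len seq - i + 1
  let counts : PySem.Dict String Int :=
    (PySem.List.pyRange 0 num_imers).foldl (fun counts k =>
      let imer := PySem.Str.slice seq (some k) (some (k + i))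
      let counts := if counts.contains imer then counts else counts.insert imer 0
      counts.insert imer (counts.getD imer 0 + 1)) PySem.Dict.empty
  counts.items

-- ===== PORT B =====
def count_imers_alt (seq : String) (i : Int) : List (String × Int) :=
  let windows := (PySem.List.pyRange 0 (PySem.Str.len seq - i + 1)).map
    (fun k => PySem.Str.slice seq (some k) (some (k + i)))
  (PySem.List.dedup windows).map (fun w => (w, (windows.count w : Int)))

-- ===== PRECONDITION & SPEC =====
def Spec_count_imers (seq : String) (i : Int) (out : List (String × Int)) : Prop := out = count_imers_alt seq i
instance (seq : String) (i : Int) (out : List (String × Int)) : Decidable (Spec_count_imers seq i out) := by unfold Spec_count_imers; infer_instance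

-- ===== CLAIM (what is proved, stated in full; the proofs are below) =====
def Claim_equal_count_imers : Prop := ∀ (seq : String) (i : Int), Dom_count_imers seq i → Spec_count_imers seq i (count_imers seq i)

-- ===== LEMMAS AND PROOFS =====

-- A's loop body ("if absent, set to 0; then += 1") is pointwise the counter step.
theorem count_imers_step_eq (d : PySem.Dict String Int) (w : String) :
    (let d' := if d.contains w then d else d.insert w 0;
     d'.insert w (d'.getD w 0 + 1)) = d.insert w (d.getD w 0 + 1) := by
  by_cases h : d.contains w
  · simp [h]
  · simp only [Bool.not_eq_true] at h
    simp [h, PySem.Dict.insert_insert_self, PySem.Dict.getD_insert_self,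
      PySem.Dict.getD_of_not_contains d 0 h]

-- A's whole loop, run over indices r through the window map f, builds Counter(r.map f).
theorem count_imers_loop_eq (r : List Int) (f : Int → String) :
    r.foldl (fun d k =>
        let w := f k
        let d' := if d.contains w then d else d.insert w 0
        d'.insert w (d'.getD w 0 + 1)) PySem.Dict.empty
      = PySem.Dict.counter (r.map f) := by
  rw [← PySem.Dict.foldl_insert_getD_add_one_eq_counter, List.foldl_map]
  exact List.foldl_ext _ _ _ (fun d k _ => count_imers_step_eq d (f k))

-- ===== VERDICT (by name: the statement is the Claim_ definition above) =====
theorem count_imers_spec : Claim_equal_count_imers := by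
  intro seq i _
  show count_imers seq i = count_imers_alt seq i
  simp only [count_imers, count_imers_alt]
  rw [count_imers_loop_eq (PySem.List.pyRange 0 (PySem.Str.len seq - i + 1))
    (fun k => PySem.Str.slice seq (some k) (some (k + i)))]
  rw [PySem.Dict.items_counter]
  rfl
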